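-- pv_equiv track=rewrite | github.com/JoseBarreiros/proprioceptive_sensing | training_code/trainning_v4.py | sortCOM
-- ===== SOURCE A (Python) =====
-- def sortCOM(COM, size):
-- 	# function sorts COM of waveguides in order, from left to right in
-- 	# increasing row order
--
-- 	#print ("size[0]: ", size[0])
--
-- 	realY = size[0] - 30
-- 	# find waveguides in top and bottom row
-- 	R1 =[]
-- 	R2 = []
-- 	R3 = []
-- 	R4 =[]
-- 	#x=0 #debugging
-- 	for cent in COM:
-- 		# in row 1
-- 		if cent[1] < (realY // 4):
-- 			R1.append(cent)
--
-- 		# in row 2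
-- 		elif (realY // 4) < cent[1] < (realY // 2):
-- 			R2.append(cent)
--
-- 		# in row 3
-- 		elif (realY // 2) < cent[1] < ((3 * realY) // 4):
-- 			R3.append(cent)
--
-- 		# in row 4
-- 		else:
-- 			R4.append(cent)
--
-- 	'''print R1
-- 	print R2
-- 	print R3
-- 	print R4'''
--
-- 	# sort rows from left to right
-- 	sort_R1 = sorted(R1, key=lambda k: k[0])
--
-- 	sort_R2 = sorted(R2, key=lambda k: k[0])
--
-- 	sort_R3 = sorted(R3, key=lambda k: k[0])
--
-- 	sort_R4 = sorted(R4, key=lambda k: k[0])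
--
-- 	# create ordered list of COMs in order of R1 from left to right then
-- 	# R2 from left to right and so on
-- 	in_order = []
-- 	in_order.extend(sort_R1)
-- 	in_order.extend(sort_R2)
-- 	in_order.extend(sort_R3)
-- 	in_order.extend(sort_R4)
--
--
-- 	return in_order
-- ===== SOURCE B (Python) =====
-- def sortCOM(COM, size):
--     # one stable sort by (row, x) instead of partitioning into four lists,
--     # sorting each and concatenating
--     realY = size[0] - 30
--
--     def row(cent):
--         if cent[1] < (realY // 4):
--             return 0
--         elif (realY // 4) < cent[1] < (realY // 2):
--             return 1
--         elif (realY // 2) < cent[1] < ((3 * realY) // 4):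
--             return 2
--         else:
--             return 3
--
--     return sorted(COM, key=lambda k: (row(k), k[0]))
-- ===== Notes on version B (the rewrite author's own statement) =====
-- stated objective: simpler
-- what changed: Replaces the four-way partition plus four separate sorts and concatenation by a single stable sort keyed on (row, x), with the row computed by the same comparison chain.
import Mathlib
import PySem

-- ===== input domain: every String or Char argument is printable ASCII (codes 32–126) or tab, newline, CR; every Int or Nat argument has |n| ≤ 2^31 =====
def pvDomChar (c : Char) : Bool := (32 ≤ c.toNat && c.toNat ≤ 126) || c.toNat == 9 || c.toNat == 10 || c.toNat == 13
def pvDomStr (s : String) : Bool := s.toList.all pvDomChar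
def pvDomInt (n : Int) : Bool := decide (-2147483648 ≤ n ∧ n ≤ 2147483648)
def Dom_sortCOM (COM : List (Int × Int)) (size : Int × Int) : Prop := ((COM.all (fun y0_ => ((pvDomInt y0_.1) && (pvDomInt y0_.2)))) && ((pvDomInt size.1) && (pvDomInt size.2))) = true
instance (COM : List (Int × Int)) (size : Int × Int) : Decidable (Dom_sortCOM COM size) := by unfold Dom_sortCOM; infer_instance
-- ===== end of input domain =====

-- B replaces A's four-way partition + four sorts + concatenation by one stable sort keyed on (row, x); objective: simpler.


-- ===== PORT A =====
-- the loop body of A's 'for cent in COM' partitioning into R1,R2,R3,R4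
def pvStep (realY : Int)
    (st : List (Int × Int) × List (Int × Int) × List (Int × Int) × List (Int × Int))
    (cent : Int × Int) :
    List (Int × Int) × List (Int × Int) × List (Int × Int) × List (Int × Int) :=
  if cent.2 < PySem.Int.floordiv realY 4 then
    (st.1 ++ [cent], st.2.1, st.2.2.1, st.2.2.2)
  else if PySem.Int.floordiv realY 4 < cent.2 ∧ cent.2 < PySem.Int.floordiv realY 2 then
    (st.1, st.2.1 ++ [cent], st.2.2.1, st.2.2.2)
  else if PySem.Int.floordiv realY 2 < cent.2 ∧ cent.2 < PySem.Int.floordiv (3 * realY) 4 then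
    (st.1, st.2.1, st.2.2.1 ++ [cent], st.2.2.2)
  else
    (st.1, st.2.1, st.2.2.1, st.2.2.2 ++ [cent])

def sortCOM (COM : List (Int × Int)) (size : Int × Int) : List (Int × Int) :=
  let realY := size.1 - 30
  let st := COM.foldl (pvStep realY) ([], [], [], [])
  let sort_R1 := PySem.List.sorted st.1 (fun k => k.1)
  let sort_R2 := PySem.List.sorted st.2.1 (fun k => k.1)
  let sort_R3 := PySem.List.sorted st.2.2.1 (fun k => k.1)
  let sort_R4 := PySem.List.sorted st.2.2.2 (fun k => k.1)
  sort_R1 ++ sort_R2 ++ sort_R3 ++ sort_R4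

-- ===== PORT B =====
-- B's helper row(cent): the same comparison chain, returned as 0/1/2/3
def pvRow (realY : Int) (cent : Int × Int) : Int :=
  if cent.2 < PySem.Int.floordiv realY 4 then 0
  else if PySem.Int.floordiv realY 4 < cent.2 ∧ cent.2 < PySem.Int.floordiv realY 2 then 1
  else if PySem.Int.floordiv realY 2 < cent.2 ∧ cent.2 < PySem.Int.floordiv (3 * realY) 4 then 2
  else 3

def sortCOM_alt (COM : List (Int × Int)) (size : Int × Int) : List (Int × Int) :=
  let realY := size.1 - 30
  PySem.List.sorted2 COM (fun k => pvRow realY k) (fun k => k.1)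

-- ===== PRECONDITION & SPEC =====
def Spec_sortCOM (COM : List (Int × Int)) (size : Int × Int) (out : List (Int × Int)) : Prop := out = sortCOM_alt COM size
instance (COM : List (Int × Int)) (size : Int × Int) (out : List (Int × Int)) : Decidable (Spec_sortCOM COM size out) := by unfold Spec_sortCOM; infer_instance

-- ===== CLAIM (what is proved, stated in full; the proofs are below) =====
def Claim_equal_sortCOM : Prop := ∀ (COM : List (Int × Int)) (size : Int × Int), Dom_sortCOM COM size → Spec_sortCOM COM size (sortCOM COM size)

-- ===== LEMMAS AND PROOFS =====

-- insertBy passes over a prefix it is never inserted before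
theorem pv_ins_skip {α : Type} (b : α → α → Bool) (c : α) (P t : List α)
    (hP : ∀ y ∈ P, b c y = false) :
    PySem.List.insertBy b c (P ++ t) = P ++ PySem.List.insertBy b c t := by
  induction P with
  | nil => simp
  | cons z P ih =>
    have hz : b c z = false := hP z (by simp)
    cases t with
    | nil =>
      simp only [List.append_nil] at *
      rw [PySem.List.insertBy_of_forall_not_before b c (z :: P) hP]
      simp [PySem.List.insertBy]
    | cons w t =>
      simp only [List.cons_append, PySem.List.insertBy, hz]
      simp only [Bool.false_eq_true, if_false]
      rw [← List.cons_append]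
      congr 1
      exact ih (fun y hy => hP y (by simp [hy]))

-- insertBy stops before a suffix it always precedes
theorem pv_ins_front {α : Type} (b : α → α → Bool) (c : α) (S t : List α)
    (ht : ∀ y ∈ t, b c y = true) :
    PySem.List.insertBy b c (S ++ t) = PySem.List.insertBy b c S ++ t := by
  induction S with
  | nil =>
    cases t with
    | nil => simp
    | cons w t =>
      have hw : b c w = true := ht w (by simp)
      simp [PySem.List.insertBy, hw]
  | cons z S ih =>
    by_cases hz : b c z = true
    · simp [PySem.List.insertBy, hz]
    · simp only [Bool.not_eq_true] at hz
      simp [PySem.List.insertBy, hz, ih]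

-- insertBy only looks at comparisons against members
theorem pv_ins_congr {α : Type} (b b' : α → α → Bool) (c : α) (S : List α)
    (h : ∀ y ∈ S, b c y = b' c y) :
    PySem.List.insertBy b c S = PySem.List.insertBy b' c S := by
  induction S with
  | nil => rfl
  | cons z S ih =>
    have hz : b c z = b' c z := h z (by simp)
    by_cases hb : b' c z = true
    · simp [PySem.List.insertBy, hz, hb]
    · simp only [Bool.not_eq_true] at hb
      simp [PySem.List.insertBy, hz, hb,
        ih (fun y hy => h y (by simp [hy]))]

-- the lexicographic 'before' test used by sorted2 with keys (pvRow, x)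
def pvBlex (realY : Int) (a b : Int × Int) : Bool :=
  decide (pvRow realY a < pvRow realY b) ||
    (!decide (pvRow realY b < pvRow realY a) && decide (a.1 < b.1))

theorem pv_row_cases (realY : Int) (c : Int × Int) :
    pvRow realY c = 0 ∨ pvRow realY c = 1 ∨ pvRow realY c = 2 ∨ pvRow realY c = 3 := by
  unfold pvRow; split_ifs <;> simp

theorem pv_sorted_append_singleton (l : List (Int × Int)) (c : Int × Int) :
    PySem.List.sorted (l ++ [c]) (fun k => k.1) =
      PySem.List.insertBy (fun a b : Int × Int => decide (a.1 < b.1)) c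
        (PySem.List.sorted l (fun k => k.1)) := by
  rw [PySem.List.sorted_eq_foldl_insertBy, PySem.List.sorted_eq_foldl_insertBy,
    List.foldl_append]
  rfl

-- an element of a sorted filtered row really has that row
theorem pv_mem_row (realY : Int) (i : Int) (l : List (Int × Int)) (y : Int × Int)
    (hy : y ∈ PySem.List.sorted (l.filter (fun c => pvRow realY c == i)) (fun k => k.1)) :
    pvRow realY y = i := by
  rw [PySem.List.mem_sorted] at hy
  have := (List.mem_filter.mp hy).2
  simpa using this

-- pvBlex against an element of a known row
theorem pv_blex_lt (realY : Int) (c y : Int × Int) (h : pvRow realY c < pvRow realY y) :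
    pvBlex realY c y = true := by simp [pvBlex, h]

theorem pv_blex_gt (realY : Int) (c y : Int × Int) (h : pvRow realY y < pvRow realY c) :
    pvBlex realY c y = false := by
  simp [pvBlex, h, not_lt_of_gt h]

theorem pv_blex_eq (realY : Int) (c y : Int × Int) (h : pvRow realY c = pvRow realY y) :
    pvBlex realY c y = decide (c.1 < y.1) := by simp [pvBlex, h]

-- MAIN: the stable insertion sort by (row, x) builds exactly the four sorted rows, concatenated
theorem pv_main (realY : Int) (xs : List (Int × Int)) :
    List.foldl (fun acc x => PySem.List.insertBy (pvBlex realY) x acc) [] xs =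
      PySem.List.sorted (xs.filter (fun c => pvRow realY c == 0)) (fun k => k.1) ++
      (PySem.List.sorted (xs.filter (fun c => pvRow realY c == 1)) (fun k => k.1) ++
      (PySem.List.sorted (xs.filter (fun c => pvRow realY c == 2)) (fun k => k.1) ++
      PySem.List.sorted (xs.filter (fun c => pvRow realY c == 3)) (fun k => k.1))) := by
  induction xs using List.reverseRecOn with
  | nil => rfl
  | append_singleton l c ih =>
    rw [List.foldl_append, List.foldl_cons, List.foldl_nil, ih]
    set S0 := PySem.List.sorted (l.filter (fun c => pvRow realY c == 0)) (fun k => k.1) with hS0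
    set S1 := PySem.List.sorted (l.filter (fun c => pvRow realY c == 1)) (fun k => k.1) with hS1
    set S2 := PySem.List.sorted (l.filter (fun c => pvRow realY c == 2)) (fun k => k.1) with hS2
    set S3 := PySem.List.sorted (l.filter (fun c => pvRow realY c == 3)) (fun k => k.1) with hS3
    have m0 : ∀ y ∈ S0, pvRow realY y = 0 := fun y hy => pv_mem_row realY 0 l y (hS0 ▸ hy)
    have m1 : ∀ y ∈ S1, pvRow realY y = 1 := fun y hy => pv_mem_row realY 1 l y (hS1 ▸ hy)
    have m2 : ∀ y ∈ S2, pvRow realY y = 2 := fun y hy => pv_mem_row realY 2 l y (hS2 ▸ hy)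
    have m3 : ∀ y ∈ S3, pvRow realY y = 3 := fun y hy => pv_mem_row realY 3 l y (hS3 ▸ hy)
    rcases pv_row_cases realY c with hc | hc | hc | hc
    · -- row 0: pass nothing, insert into S0, everything after compares true
      simp only [List.filter_append, List.filter_cons, List.filter_nil, hc]
      norm_num
      rw [pv_sorted_append_singleton, ← hS0, ← hS1, ← hS2, ← hS3,
        pv_ins_front (pvBlex realY) c S0 (S1 ++ (S2 ++ S3))
          (by intro y hy
              rcases List.mem_append.mp hy with h | h
              · exact pv_blex_lt realY c y (by rw [hc, m1 y h]; norm_num)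
              rcases List.mem_append.mp h with h | h
              · exact pv_blex_lt realY c y (by rw [hc, m2 y h]; norm_num)
              · exact pv_blex_lt realY c y (by rw [hc, m3 y h]; norm_num)),
        pv_ins_congr (pvBlex realY) (fun a b : Int × Int => decide (a.1 < b.1)) c S0
          (fun y hy => pv_blex_eq realY c y (by rw [hc, m0 y hy]))]
    · -- row 1
      simp only [List.filter_append, List.filter_cons, List.filter_nil, hc]
      norm_num
      rw [pv_sorted_append_singleton, ← hS0, ← hS1, ← hS2, ← hS3,
        pv_ins_skip (pvBlex realY) c S0 (S1 ++ (S2 ++ S3))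
          (fun y hy => pv_blex_gt realY c y (by rw [hc, m0 y hy]; norm_num)),
        pv_ins_front (pvBlex realY) c S1 (S2 ++ S3)
          (by intro y hy
              rcases List.mem_append.mp hy with h | h
              · exact pv_blex_lt realY c y (by rw [hc, m2 y h]; norm_num)
              · exact pv_blex_lt realY c y (by rw [hc, m3 y h]; norm_num)),
        pv_ins_congr (pvBlex realY) (fun a b : Int × Int => decide (a.1 < b.1)) c S1
          (fun y hy => pv_blex_eq realY c y (by rw [hc, m1 y hy]))]
    · -- row 2
      simp only [List.filter_append, List.filter_cons, List.filter_nil, hc]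
      norm_num
      rw [pv_sorted_append_singleton, ← hS0, ← hS1, ← hS2, ← hS3,
        pv_ins_skip (pvBlex realY) c S0 (S1 ++ (S2 ++ S3))
          (fun y hy => pv_blex_gt realY c y (by rw [hc, m0 y hy]; norm_num)),
        pv_ins_skip (pvBlex realY) c S1 (S2 ++ S3)
          (fun y hy => pv_blex_gt realY c y (by rw [hc, m1 y hy]; norm_num)),
        pv_ins_front (pvBlex realY) c S2 S3
          (fun y hy => pv_blex_lt realY c y (by rw [hc, m3 y hy]; norm_num)),
        pv_ins_congr (pvBlex realY) (fun a b : Int × Int => decide (a.1 < b.1)) c S2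
          (fun y hy => pv_blex_eq realY c y (by rw [hc, m2 y hy]))]
    · -- row 3
      simp only [List.filter_append, List.filter_cons, List.filter_nil, hc]
      norm_num
      rw [pv_sorted_append_singleton, ← hS0, ← hS1, ← hS2, ← hS3,
        pv_ins_skip (pvBlex realY) c S0 (S1 ++ (S2 ++ S3))
          (fun y hy => pv_blex_gt realY c y (by rw [hc, m0 y hy]; norm_num)),
        pv_ins_skip (pvBlex realY) c S1 (S2 ++ S3)
          (fun y hy => pv_blex_gt realY c y (by rw [hc, m1 y hy]; norm_num)),
        pv_ins_skip (pvBlex realY) c S2 S3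
          (fun y hy => pv_blex_gt realY c y (by rw [hc, m2 y hy]; norm_num)),
        pv_ins_congr (pvBlex realY) (fun a b : Int × Int => decide (a.1 < b.1)) c S3
          (fun y hy => pv_blex_eq realY c y (by rw [hc, m3 y hy]))]

-- A's partition loop computes the four row filters
theorem pv_fold4 (realY : Int) (l : List (Int × Int))
    (a b c d : List (Int × Int)) :
    l.foldl (pvStep realY) (a, b, c, d) =
      (a ++ l.filter (fun x => pvRow realY x == 0),
       b ++ l.filter (fun x => pvRow realY x == 1),
       c ++ l.filter (fun x => pvRow realY x == 2),
       d ++ l.filter (fun x => pvRow realY x == 3)) := by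
  induction l generalizing a b c d with
  | nil => simp
  | cons x l ih =>
    rw [List.foldl_cons]
    by_cases h0 : x.2 < PySem.Int.floordiv realY 4
    · have hs : pvStep realY (a, b, c, d) x = (a ++ [x], b, c, d) := by
        unfold pvStep; rw [if_pos h0]
      have hr : pvRow realY x = 0 := by unfold pvRow; rw [if_pos h0]
      rw [hs, ih]
      simp [hr, List.append_assoc]
    · by_cases h1 : PySem.Int.floordiv realY 4 < x.2 ∧ x.2 < PySem.Int.floordiv realY 2
      · have hs : pvStep realY (a, b, c, d) x = (a, b ++ [x], c, d) := by
          unfold pvStep; rw [if_neg h0, if_pos h1]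
        have hr : pvRow realY x = 1 := by unfold pvRow; rw [if_neg h0, if_pos h1]
        rw [hs, ih]
        simp [hr, List.append_assoc]
      · by_cases h2 : PySem.Int.floordiv realY 2 < x.2 ∧ x.2 < PySem.Int.floordiv (3 * realY) 4
        · have hs : pvStep realY (a, b, c, d) x = (a, b, c ++ [x], d) := by
            unfold pvStep; rw [if_neg h0, if_neg h1, if_pos h2]
          have hr : pvRow realY x = 2 := by unfold pvRow; rw [if_neg h0, if_neg h1, if_pos h2]
          rw [hs, ih]
          simp [hr, List.append_assoc]
        · have hs : pvStep realY (a, b, c, d) x = (a, b, c, d ++ [x]) := by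
            unfold pvStep; rw [if_neg h0, if_neg h1, if_neg h2]
          have hr : pvRow realY x = 3 := by unfold pvRow; rw [if_neg h0, if_neg h1, if_neg h2]
          rw [hs, ih]
          simp [hr, List.append_assoc]

-- B unfolded to the insertion-sort fold with the lexicographic test
theorem pv_alt_eq (COM : List (Int × Int)) (size : Int × Int) :
    sortCOM_alt COM size =
      List.foldl (fun acc x => PySem.List.insertBy (pvBlex (size.1 - 30)) x acc) [] COM := by
  simp only [sortCOM_alt, PySem.List.sorted2]
  rfl

-- ===== VERDICT (by name: the statement is the Claim_ definition above) =====
theorem sortCOM_spec : Claim_equal_sortCOM := by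
  intro COM size _
  show sortCOM COM size = sortCOM_alt COM size
  rw [pv_alt_eq, pv_main]
  simp only [sortCOM, pv_fold4, List.nil_append, List.append_assoc]
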